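-- pv_equiv track=rewrite | github.com/Amirjjf/Distributed-MoE-Systems | src/rebalance.py | is_map_ep_compatible
-- ===== SOURCE A (Python) =====
-- from typing import Any, Callable, Deque, Dict, List, Optional, Tuple, TypeVar
--
-- def is_map_ep_compatible(expert_to_gpu_map: List[int], ep_size: int) -> bool:
--     if ep_size <= 0:
--         return False
--     if len(expert_to_gpu_map) % ep_size != 0:
--         return False
--
--     target_per_rank = len(expert_to_gpu_map) // ep_size
--     counts = [0 for _ in range(ep_size)]
--     for gpu_id in expert_to_gpu_map:
--         g = int(gpu_id)
--         if g < 0 or g >= ep_size: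
--             return False
--         counts[g] += 1
--     return all(c == target_per_rank for c in counts)
-- ===== SOURCE B (Python) =====
-- def is_map_ep_compatible(expert_to_gpu_map, ep_size):
--     if ep_size <= 0:
--         return False
--     if len(expert_to_gpu_map) % ep_size != 0:
--         return False
--     target = len(expert_to_gpu_map) // ep_size
--     expected = [i for i in range(ep_size) for _ in range(target)]
--     return sorted(int(g) for g in expert_to_gpu_map) == expected
-- ===== Notes on version B (the rewrite author's own statement) =====
-- stated objective: alternative
-- what changed: Replaces the per-rank counting table with early exit plus the all-equal scan by sorting the map and comparing it to the canonical balanced layout [0]*target + [1]*target + ...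
import Mathlib
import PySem

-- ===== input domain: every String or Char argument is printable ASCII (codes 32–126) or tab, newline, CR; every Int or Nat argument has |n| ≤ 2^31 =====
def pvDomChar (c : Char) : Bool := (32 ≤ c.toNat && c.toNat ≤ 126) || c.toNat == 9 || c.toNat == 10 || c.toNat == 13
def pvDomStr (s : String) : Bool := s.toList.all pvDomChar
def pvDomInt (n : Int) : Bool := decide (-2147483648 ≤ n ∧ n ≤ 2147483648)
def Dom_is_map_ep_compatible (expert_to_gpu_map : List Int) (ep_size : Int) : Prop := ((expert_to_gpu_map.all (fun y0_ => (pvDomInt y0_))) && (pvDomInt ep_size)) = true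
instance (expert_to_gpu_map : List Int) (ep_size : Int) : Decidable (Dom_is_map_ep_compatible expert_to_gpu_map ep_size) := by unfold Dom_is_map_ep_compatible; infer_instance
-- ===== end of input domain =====

-- B replaces A's counting table + early exit + all-equal scan by sorting the map and
-- comparing it with the canonical balanced layout (objective: alternative decomposition).

-- ===== PORT A =====
-- the counting loop; `none` models the early `return False` on an out-of-range id
-- (counts[g] += 1: the guard guarantees 0 ≤ g < ep_size = len(counts), so getD is exact here)
def pvLoopA (xs : List Int) (ep : Int) (counts : List Int) : Option (List Int) :=
  match xs with
  | [] => some counts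
  | g :: rest =>
    if g < 0 ∨ g ≥ ep then none
    else pvLoopA rest ep (counts.set g.toNat (counts.getD g.toNat 0 + 1))

def is_map_ep_compatible (expert_to_gpu_map : List Int) (ep_size : Int) : Bool :=
  if ep_size ≤ 0 then false
  else if PySem.Int.mod (expert_to_gpu_map.length : Int) ep_size ≠ 0 then false
  else
    let target_per_rank := PySem.Int.floordiv (expert_to_gpu_map.length : Int) ep_size
    let counts : List Int := (PySem.List.pyRange 0 ep_size 1).map (fun _ => 0)
    match pvLoopA expert_to_gpu_map ep_size counts with
    | none => false
    | some cs => cs.all (fun c => c == target_per_rank)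

-- ===== PORT B =====
def is_map_ep_compatible_alt (expert_to_gpu_map : List Int) (ep_size : Int) : Bool :=
  if ep_size ≤ 0 then false
  else if PySem.Int.mod (expert_to_gpu_map.length : Int) ep_size ≠ 0 then false
  else
    let target := PySem.Int.floordiv (expert_to_gpu_map.length : Int) ep_size
    let expected := (PySem.List.pyRange 0 ep_size 1).flatMap
      (fun i => (PySem.List.pyRange 0 target 1).map (fun _ => i))
    decide (PySem.List.sorted expert_to_gpu_map (fun x => x) false = expected)

-- ===== PRECONDITION & SPEC =====
def Spec_is_map_ep_compatible (expert_to_gpu_map : List Int) (ep_size : Int) (out : Bool) : Prop := out = is_map_ep_compatible_alt expert_to_gpu_map ep_size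
instance (expert_to_gpu_map : List Int) (ep_size : Int) (out : Bool) : Decidable (Spec_is_map_ep_compatible expert_to_gpu_map ep_size out) := by unfold Spec_is_map_ep_compatible; infer_instance

-- ===== CLAIM (what is proved, stated in full; the proofs are below) =====
def Claim_equal_is_map_ep_compatible : Prop := ∀ (expert_to_gpu_map : List Int) (ep_size : Int), Dom_is_map_ep_compatible expert_to_gpu_map ep_size → Spec_is_map_ep_compatible expert_to_gpu_map ep_size (is_map_ep_compatible expert_to_gpu_map ep_size)

-- ===== LEMMAS AND PROOFS =====

def pvRep (l : List Int) (t : Nat) : List Int := l.flatMap (fun i => List.replicate t i)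

theorem pvMem_rep {l : List Int} {t : Nat} {x : Int} (h : x ∈ pvRep l t) : x ∈ l := by
  simp only [pvRep, List.mem_flatMap] at h
  obtain ⟨i, hi, hx⟩ := h
  exact (List.eq_of_mem_replicate hx) ▸ hi

theorem pvCount_rep (l : List Int) (t : Nat) (v : Int) (hnd : l.Nodup) :
    (pvRep l t).count v = if v ∈ l then t else 0 := by
  induction l with
  | nil => simp [pvRep]
  | cons a l ih =>
    rw [List.nodup_cons] at hnd
    have := ih hnd.2
    simp only [pvRep, List.flatMap_cons, List.count_append, List.count_replicate] at this ⊢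
    rw [this]
    by_cases hv : v = a
    · subst hv
      simp [hnd.1]
    · simp [List.mem_cons, hv, Ne.symm hv, beq_iff_eq]

theorem pvPairwise_rep (l : List Int) (t : Nat) (h : l.Pairwise (· < ·)) :
    (pvRep l t).Pairwise (· ≤ ·) := by
  induction l with
  | nil => simp [pvRep]
  | cons a l ih =>
    rw [List.pairwise_cons] at h
    simp only [pvRep, List.flatMap_cons]
    rw [List.pairwise_append]
    refine ⟨?_, ih h.2, ?_⟩
    · apply List.pairwise_replicate.mpr
      exact Or.inr le_rfl
    · intro x hx y hy
      have hxa : x = a := List.eq_of_mem_replicate hx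
      have hyl : y ∈ l := pvMem_rep (l := l) (t := t) hy
      exact hxa ▸ le_of_lt (h.1 y hyl)

theorem pvLoopA_none {xs : List Int} {ep : Int} (counts : List Int)
    (h : ∃ x ∈ xs, x < 0 ∨ ep ≤ x) : pvLoopA xs ep counts = none := by
  induction xs generalizing counts with
  | nil => simp at h
  | cons g rest ih =>
    obtain ⟨x, hx, hbad⟩ := h
    simp only [pvLoopA]
    rcases List.mem_cons.mp hx with rfl | hmem
    · rw [if_pos (by omega)]
    · split
      · rfl
      · exact ih _ ⟨x, hmem, hbad⟩

theorem pvLoopA_some {xs : List Int} {ep : Int} (counts : List Int)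
    (h : ∀ x ∈ xs, 0 ≤ x ∧ x < ep) :
    pvLoopA xs ep counts =
      some (xs.foldl (fun cs g => cs.set g.toNat (cs.getD g.toNat 0 + 1)) counts) := by
  induction xs generalizing counts with
  | nil => simp [pvLoopA]
  | cons g rest ih =>
    have hg := h g (List.mem_cons_self)
    simp only [pvLoopA, List.foldl_cons]
    rw [if_neg (by omega)]
    exact ih _ (fun x hx => h x (List.mem_cons_of_mem _ hx))

theorem pvFold_length (xs : List Int) (counts : List Int) :
    (xs.foldl (fun cs g => cs.set g.toNat (cs.getD g.toNat 0 + 1)) counts).length = counts.length := by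
  induction xs generalizing counts with
  | nil => rfl
  | cons g rest ih =>
    rw [List.foldl_cons, ih]
    simp

theorem pvFold_count (xs : List Int) (ep : Int) (counts : List Int)
    (h : ∀ x ∈ xs, 0 ≤ x ∧ x < ep) (hl : counts.length = ep.toNat) (i : Nat) (hi : i < ep.toNat) :
    (xs.foldl (fun cs g => cs.set g.toNat (cs.getD g.toNat 0 + 1)) counts).getD i 0
      = counts.getD i 0 + (xs.count (i : Int) : Int) := by
  induction xs generalizing counts with
  | nil => simp
  | cons g rest ih =>
    have hg := h g (List.mem_cons_self)
    have hgn : g.toNat < counts.length := by omega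
    simp only [List.foldl_cons, List.count_cons]
    rw [ih _ (fun x hx => h x (List.mem_cons_of_mem _ hx)) (by simp [hl])]
    by_cases hgi : g.toNat = i
    · have hbe : (g == (i : Int)) = true := by simp; omega
      rw [hgi, hbe]
      simp only [List.getD_eq_getElem?_getD,
        List.getElem?_set_self (show i < counts.length by omega), Option.getD_some]
      push_cast
      ring
    · have hbe : (g == (i : Int)) = false := by simp; omega
      rw [hbe]
      simp [List.getD_eq_getElem?_getD, List.getElem?_set_ne hgi]

theorem pvCore (xs : List Int) (ep : Int) (hep : 0 < ep) (t : Nat) :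
    ((∀ x ∈ xs, 0 ≤ x ∧ x < ep) ∧ (∀ i : Nat, i < ep.toNat → xs.count (i : Int) = t))
      ↔ xs.Perm (pvRep (PySem.List.pyRange 0 ep 1) t) := by
  have hcnt : ∀ v : Int, (pvRep (PySem.List.pyRange 0 ep 1) t).count v
      = if 0 ≤ v ∧ v < ep then t else 0 := by
    intro v
    rw [pvCount_rep _ _ _ (PySem.List.nodup_pyRange_one 0 ep)]
    simp [PySem.List.mem_pyRange_one]
  constructor
  · rintro ⟨hP, hC⟩
    rw [List.perm_iff_count]
    intro v
    rw [hcnt]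
    by_cases hv : 0 ≤ v ∧ v < ep
    · have hvn : v.toNat < ep.toNat := by omega
      have := hC v.toNat hvn
      rw [if_pos hv]
      rwa [show ((v.toNat : Int)) = v by omega] at this
    · rw [if_neg hv, List.count_eq_zero]
      intro hmem
      exact hv (hP v hmem)
  · intro hperm
    have hcount : ∀ v : Int, xs.count v = if 0 ≤ v ∧ v < ep then t else 0 := by
      intro v
      rw [List.perm_iff_count.mp hperm v, hcnt]
    constructor
    · intro x hx
      by_contra hbad
      have := hcount x
      rw [if_neg hbad, List.count_eq_zero] at this
      exact this hx
    · intro i hi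
      have := hcount (i : Int)
      rwa [if_pos (by constructor <;> omega)] at this

theorem pvMain (xs : List Int) (ep : Int) :
    is_map_ep_compatible xs ep = is_map_ep_compatible_alt xs ep := by
  unfold is_map_ep_compatible is_map_ep_compatible_alt
  by_cases h1 : ep ≤ 0
  · simp [h1]
  · rw [if_neg h1, if_neg h1]
    by_cases h2 : PySem.Int.mod (xs.length : Int) ep ≠ 0
    · rw [if_pos h2, if_pos h2]
    · rw [if_neg h2, if_neg h2]
      dsimp only
      have hep : 0 < ep := by omega
      set target := PySem.Int.floordiv (xs.length : Int) ep with htarget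
      have htnn : 0 ≤ target := by
        rw [htarget, PySem.Int.floordiv_eq_ediv_of_pos hep]
        exact Int.ediv_nonneg (by positivity) (le_of_lt hep)
      set t := target.toNat with ht
      set E := pvRep (PySem.List.pyRange 0 ep 1) t with hE
      have hin : ∀ i : Int, (PySem.List.pyRange 0 target 1).map (fun _ => i)
          = List.replicate t i := by
        intro i
        rw [List.map_const', PySem.List.length_pyRange_one]
        congr 1
        omega
      have hexp : (PySem.List.pyRange 0 ep 1).flatMap
          (fun i => (PySem.List.pyRange 0 target 1).map (fun _ => i)) = E := by
        rw [hE]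
        unfold pvRep
        simp only [hin]
      have hsorted : (PySem.List.sorted xs (fun x => x) false = E) ↔ xs.Perm E := by
        constructor
        · intro heq
          have hp := PySem.List.sorted_perm xs (fun x => x) false
          rw [heq] at hp
          exact hp.symm
        · intro hp
          exact PySem.List.sorted_id_eq_of_perm_of_pairwise xs E hp.symm
            (pvPairwise_rep _ _ (PySem.List.pairwise_lt_pyRange_one 0 ep))
      rw [hexp]
      set counts : List Int := (PySem.List.pyRange 0 ep 1).map (fun _ => 0) with hcounts
      have hclen : counts.length = ep.toNat := by
        simp [hcounts, PySem.List.length_pyRange_one]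
      have hc0 : ∀ i : Nat, counts.getD i 0 = 0 := by
        intro i
        by_cases hil : i < counts.length
        · rw [List.getD_eq_getElem _ _ hil]
          simp [hcounts]
        · rw [List.getD_eq_default _ _ (by omega)]
      by_cases hP : ∀ x ∈ xs, 0 ≤ x ∧ x < ep
      · rw [pvLoopA_some _ hP]
        dsimp only
        set fold := xs.foldl (fun cs g => cs.set g.toNat (cs.getD g.toNat 0 + 1)) counts with hfold
        have hflen : fold.length = ep.toNat := by rw [hfold, pvFold_length, hclen]
        have hfi : ∀ i : Nat, i < ep.toNat → fold.getD i 0 = (xs.count (i : Int) : Int) := by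
          intro i hi
          rw [hfold, pvFold_count xs ep counts hP hclen i hi, hc0]
          ring
        have hall : (fold.all (fun c => c == target) = true)
            ↔ (∀ i : Nat, i < ep.toNat → xs.count (i : Int) = t) := by
          rw [List.all_eq_true]
          constructor
          · intro h i hi
            have hilt : i < fold.length := by omega
            have hmem := h fold[i] (List.getElem_mem hilt)
            rw [beq_iff_eq] at hmem
            have hgd : fold.getD i 0 = fold[i] := List.getD_eq_getElem fold 0 hilt
            rw [← hgd, hfi i hi] at hmem
            omega
          · intro h c hc
            obtain ⟨i, hilt, rfl⟩ := List.mem_iff_getElem.mp hc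
            rw [beq_iff_eq]
            have hgd : fold.getD i 0 = fold[i] := List.getD_eq_getElem fold 0 hilt
            rw [← hgd, hfi i (by omega), h i (by omega)]
            omega
        by_cases hC : ∀ i : Nat, i < ep.toNat → xs.count (i : Int) = t
        · rw [hall.mpr hC, decide_eq_true (hsorted.mpr ((pvCore xs ep hep t).mp ⟨hP, hC⟩))]
        · rw [Bool.eq_false_iff.mpr (fun h => hC (hall.mp h)),
            decide_eq_false (fun heq => hC (((pvCore xs ep hep t).mpr (hsorted.mp heq)).2))]
      · push Not at hP
        obtain ⟨x, hx, hbad⟩ := hP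
        rw [pvLoopA_none _ ⟨x, hx, by omega⟩]
        dsimp only
        rw [decide_eq_false (fun heq =>
          absurd (((pvCore xs ep hep t).mpr (hsorted.mp heq)).1 x hx) (by omega))]

-- ===== VERDICT (by name: the statement is the Claim_ definition above) =====
theorem is_map_ep_compatible_spec : Claim_equal_is_map_ep_compatible := by
  intro xs ep _
  unfold Spec_is_map_ep_compatible
  exact pvMain xs ep
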